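-- pv_equiv track=rewrite | github.com/sequana/lora | sequana_pipelines/lora/src/remote_blast.py | _count_gap_openings
-- ===== SOURCE A (Python) =====
-- def _count_gap_openings(seq: str) -> int:
--     """Count the number of gap-opening events (runs of '-') in an aligned sequence."""
--     count, in_gap = 0, False
--     for ch in seq:
--         if ch == "-":
--             if not in_gap:
--                 count += 1
--                 in_gap = True
--         else:
--             in_gap = False
--     return count
-- ===== SOURCE B (Python) =====
-- import re
--
-- def _count_gap_openings(seq: str) -> int:
--     """Count gap-opening events: number of maximal runs of '-' in seq."""
--     return len(re.findall(r"-+", seq))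
-- ===== Notes on version B (the rewrite author's own statement) =====
-- stated objective: idiomatic
-- what changed: Replaces the per-character in_gap state machine with a single re.findall(r'-+') that returns all maximal gap runs and counts them.
import Mathlib
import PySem

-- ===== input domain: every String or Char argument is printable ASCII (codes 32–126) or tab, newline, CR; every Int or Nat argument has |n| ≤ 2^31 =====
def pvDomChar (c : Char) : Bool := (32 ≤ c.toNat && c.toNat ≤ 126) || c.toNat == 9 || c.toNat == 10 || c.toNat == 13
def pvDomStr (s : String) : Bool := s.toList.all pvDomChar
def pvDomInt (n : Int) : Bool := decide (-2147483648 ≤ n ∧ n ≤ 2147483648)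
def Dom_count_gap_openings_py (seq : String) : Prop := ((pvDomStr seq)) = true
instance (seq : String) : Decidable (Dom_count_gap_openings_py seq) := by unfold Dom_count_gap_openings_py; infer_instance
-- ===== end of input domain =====

-- B counts maximal '-' runs via re.findall(r'-+') instead of A's in_gap state machine; objective: idiomatic, same complexity.

-- ===== PORT A =====
-- literal port of A's loop: state (count, in_gap) updated per character
def pvGapLoop (st : Int × Bool) (ch : Char) : Int × Bool :=
  if ch = '-' then
    if !st.2 then (st.1 + 1, true) else st
  else
    (st.1, false)

def count_gap_openings_py (seq : String) : Int :=
  (seq.toList.foldl pvGapLoop (0, false)).1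

-- ===== PORT B =====
-- port of re.findall(r'-+'): scan for the next '-', consume the maximal run, count it
def pvCountRuns : List Char → Int
  | [] => 0
  | c :: rest =>
    if c = '-' then 1 + pvCountRuns (rest.dropWhile (· = '-'))
    else pvCountRuns rest
termination_by l => l.length
decreasing_by
  · exact Nat.lt_succ_of_le (List.length_dropWhile_le _ _)
  · simp

def count_gap_openings_py_alt (seq : String) : Int :=
  pvCountRuns seq.toList

-- ===== PRECONDITION & SPEC =====
def Spec_count_gap_openings_py (seq : String) (out : Int) : Prop := out = count_gap_openings_py_alt seq
instance (seq : String) (out : Int) : Decidable (Spec_count_gap_openings_py seq out) := by unfold Spec_count_gap_openings_py; infer_instance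

-- ===== CLAIM (what is proved, stated in full; the proofs are below) =====
def Claim_equal_count_gap_openings_py : Prop := ∀ (seq : String), Dom_count_gap_openings_py seq → Spec_count_gap_openings_py seq (count_gap_openings_py seq)

-- ===== LEMMAS AND PROOFS =====

theorem pvGapLoop_charac (l : List Char) :
    ∀ count : Int,
      (l.foldl pvGapLoop (count, false)).1 = count + pvCountRuns l ∧
      (l.foldl pvGapLoop (count, true)).1 = count + pvCountRuns (l.dropWhile (· = '-')) := by
  induction l with
  | nil => intro count; simp [pvCountRuns]
  | cons c t ih =>
    intro count
    by_cases hc : c = '-'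
    · subst hc
      constructor
      · simp only [List.foldl_cons, pvGapLoop]
        rw [pvCountRuns]
        have := (ih (count + 1)).2
        simp only [Bool.not_false] at *
        rw [show (count + 1, true) = ((count + 1 : Int), true) from rfl] at *
        simp [this]; ring
      · simp only [List.foldl_cons, pvGapLoop]
        have := (ih count).2
        simp only [Bool.not_true] at *
        simp only [List.dropWhile_cons, decide_eq_true_eq]
        simpa using this
    · constructor
      · simp only [List.foldl_cons, pvGapLoop, if_neg hc]
        rw [pvCountRuns, if_neg hc]
        exact (ih count).1
      · simp only [List.foldl_cons, pvGapLoop, if_neg hc]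
        rw [List.dropWhile_cons]
        simp only [decide_eq_true_eq, if_neg hc]
        rw [pvCountRuns, if_neg hc]
        exact (ih count).1

-- ===== VERDICT (by name: the statement is the Claim_ definition above) =====
theorem count_gap_openings_py_spec : Claim_equal_count_gap_openings_py := by
  intro seq _
  unfold Spec_count_gap_openings_py count_gap_openings_py count_gap_openings_py_alt
  have := (pvGapLoop_charac seq.toList 0).1
  simpa using this
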